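-- pv_equiv track=rewrite | github.com/qaz027/zzPractice | transportWords.py | opposite_case_letter_mapping
-- ===== SOURCE A (Python) =====
-- def opposite_case_letter_mapping(input_string):
--     def opposite_letter(c): # I need this explained
--         if 'a' <= c <= 'z':
--             return chr(ord('z') - (ord(c) - ord('a')))
--         elif 'A' <= c <= 'Z':
--             return chr(ord('Z') - (ord(c) - ord('A')))
--         return c
--
--     words = input_string.split()
--     transformed_words = [''.join(opposite_letter(c) for c in word) for word in words]
--
--     # Reverse the order of the words and join them with a space
--     result = ' '.join([transformed_words[-1]]+list(transformed_words[:-1]))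
--
--     return result
-- ===== SOURCE B (Python) =====
-- def opposite_case_letter_mapping(input_string):
--     # Fused single pass: tokenize and translate at once with an explicit state
--     # machine (no split(), no nested per-word loop); letters are mirrored by the
--     # constant-sum identity ord(c) + ord(mirror) = 219 (lower) / 155 (upper).
--     words = []
--     cur = []
--     for ch in input_string:
--         if ch.isspace():
--             if cur:
--                 words.append(''.join(cur))
--                 cur = []
--         elif 'a' <= ch <= 'z':
--             cur.append(chr(219 - ord(ch)))
--         elif 'A' <= ch <= 'Z':
--             cur.append(chr(155 - ord(ch)))
--         else:
--             cur.append(ch)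
--     if cur:
--         words.append(''.join(cur))
--     return ' '.join([words[-1]] + words[:-1])
-- ===== Notes on version B (the rewrite author's own statement) =====
-- stated objective: alternative
-- what changed: B replaces A's staged pipeline (split into words, then a nested per-word per-character generator comprehension with a branching helper) by one fused left-to-right state machine that tokenizes and translates in a single pass with word/character accumulators, mapping letters via the constant-sum mirror chr(219-ord(c))/chr(155-ord(c)); the last-word-to-front rotation is kept.
import Mathlib
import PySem

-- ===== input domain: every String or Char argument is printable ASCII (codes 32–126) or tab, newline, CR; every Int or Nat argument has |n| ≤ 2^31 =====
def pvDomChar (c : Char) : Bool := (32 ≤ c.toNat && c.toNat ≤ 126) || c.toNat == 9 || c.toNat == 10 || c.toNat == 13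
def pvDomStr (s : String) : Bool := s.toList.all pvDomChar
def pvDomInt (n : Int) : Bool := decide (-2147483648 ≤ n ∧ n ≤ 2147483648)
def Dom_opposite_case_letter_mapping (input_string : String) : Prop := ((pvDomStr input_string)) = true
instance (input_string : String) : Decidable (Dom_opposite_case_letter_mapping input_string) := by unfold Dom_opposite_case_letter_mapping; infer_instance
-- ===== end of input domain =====

-- B replaces A's staged pipeline (split, then nested per-word comprehension) by one fused
-- single-pass state machine that tokenizes and translates at once; same rotation and the
-- same IndexError on inputs with no words (excluded by Pre_).


-- ===== PORT A =====
-- Python compares one-char strings by code point, so 'a' <= c <= 'z' is a toNat comparison.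
def pvOppLetter (c : Char) : Char :=
  if 'a'.toNat ≤ c.toNat ∧ c.toNat ≤ 'z'.toNat then
    Char.ofNat ('z'.toNat - (c.toNat - 'a'.toNat))
  else if 'A'.toNat ≤ c.toNat ∧ c.toNat ≤ 'Z'.toNat then
    Char.ofNat ('Z'.toNat - (c.toNat - 'A'.toNat))
  else c

def opposite_case_letter_mapping (input_string : String) : String :=
  let words := PySem.Str.split₀ input_string
  let transformed := words.map (fun w => String.ofList (w.toList.map pvOppLetter))
  -- transformed[-1] raises IndexError on an empty word list; Pre_ excludes that, "" is the
  -- value here only to keep the port total.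
  PySem.Str.join " "
    (PySem.List.pyGetD transformed (-1) "" :: PySem.List.slice transformed none (some (-1)))

-- ===== PORT B =====
-- one step of B's loop body: state = (finished words, current word's chars)
def pvStep (st : List String × List Char) (ch : Char) : List String × List Char :=
  if PySem.Chars.isspace ch then
    if st.2.isEmpty then st else (st.1 ++ [String.ofList st.2], [])
  else if 'a'.toNat ≤ ch.toNat ∧ ch.toNat ≤ 'z'.toNat then
    (st.1, st.2 ++ [Char.ofNat (219 - ch.toNat)])
  else if 'A'.toNat ≤ ch.toNat ∧ ch.toNat ≤ 'Z'.toNat then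
    (st.1, st.2 ++ [Char.ofNat (155 - ch.toNat)])
  else (st.1, st.2 ++ [ch])

def opposite_case_letter_mapping_alt (input_string : String) : String :=
  let st := input_string.toList.foldl pvStep ([], [])
  let words := if st.2.isEmpty then st.1 else st.1 ++ [String.ofList st.2]
  -- words[-1] raises IndexError on an empty word list; Pre_ excludes that.
  PySem.Str.join " "
    (PySem.List.pyGetD words (-1) "" :: PySem.List.slice words none (some (-1)))

-- ===== PRECONDITION & SPEC =====
-- Pre_ excludes exactly the inputs with no words (empty or all-whitespace strings), on which
-- both Pythons raise IndexError at words[-1].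
def Pre_opposite_case_letter_mapping (input_string : String) : Prop :=
  (input_string.toList.any (fun c => !PySem.Chars.isspace c)) = true
instance (input_string : String) : Decidable (Pre_opposite_case_letter_mapping input_string) := by unfold Pre_opposite_case_letter_mapping; infer_instance

def pvWitness_opposite_case_letter_mapping : String := "Hello World"

def Spec_opposite_case_letter_mapping (input_string : String) (out : String) : Prop := out = opposite_case_letter_mapping_alt input_string
instance (input_string : String) (out : String) : Decidable (Spec_opposite_case_letter_mapping input_string out) := by unfold Spec_opposite_case_letter_mapping; infer_instance

-- ===== CLAIM (what is proved, stated in full; the proofs are below) =====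
def Claim_equal_opposite_case_letter_mapping : Prop := ∀ (input_string : String), Dom_opposite_case_letter_mapping input_string → Pre_opposite_case_letter_mapping input_string → Spec_opposite_case_letter_mapping input_string (opposite_case_letter_mapping input_string)

-- ===== LEMMAS AND PROOFS =====

-- abbreviation used only in the proofs: A's per-word transformation on raw char lists
def pvT (w : List Char) : String := String.ofList (w.map pvOppLetter)

-- B's end-of-loop flush
def pvFinish (st : List String × List Char) : List String :=
  if st.2.isEmpty then st.1 else st.1 ++ [String.ofList st.2]

-- the mirror arithmetic of B agrees with A's letter map on letters, and non-letters pass through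
theorem pvStep_char (c : Char) (h : PySem.Chars.isspace c = false) (st : List String × List Char) :
    pvStep st c = (st.1, st.2 ++ [pvOppLetter c]) := by
  unfold pvStep pvOppLetter
  simp only [h, Bool.false_eq_true, if_false]
  have ha : 'a'.toNat = 97 := rfl
  have hz : 'z'.toNat = 122 := rfl
  have hA : 'A'.toNat = 65 := rfl
  have hZ : 'Z'.toNat = 90 := rfl
  rw [ha, hz, hA, hZ]
  split_ifs with h1 h2
  · have e : 219 - c.toNat = 122 - (c.toNat - 97) := by omega
    rw [e]
  · have e : 155 - c.toNat = 90 - (c.toNat - 65) := by omega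
    rw [e]
  · rfl

-- core invariant: B's fused fold computes A's (split, then map) pipeline
theorem pvFold_go (l : List Char) :
    ∀ (gcur : List Char) (acc : List (List Char)),
      pvFinish (l.foldl pvStep ((acc.reverse).map pvT, gcur.reverse.map pvOppLetter))
        = (PySem.Chars.split₀.go l gcur acc).map pvT := by
  induction l with
  | nil =>
    intro gcur acc
    simp only [List.foldl_nil, PySem.Chars.split₀.go, pvFinish]
    by_cases h : gcur.isEmpty
    · simp [h, List.isEmpty_map, List.isEmpty_reverse]
    · simp [h, List.isEmpty_map, List.isEmpty_reverse, pvT, List.map_reverse]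
  | cons c rest ih =>
    intro gcur acc
    simp only [List.foldl_cons]
    by_cases hs : PySem.Chars.isspace c
    · by_cases he : gcur.isEmpty
      · have hg : gcur = [] := List.isEmpty_iff.mp he
        have hstep : pvStep ((acc.reverse).map pvT, gcur.reverse.map pvOppLetter) c
            = ((acc.reverse).map pvT, ([] : List Char).reverse.map pvOppLetter) := by
          simp [pvStep, hs, hg]
        rw [hstep, ih [] acc]
        simp [PySem.Chars.split₀.go, hs, hg]
      · have hne : (gcur.reverse.map pvOppLetter).isEmpty = false := by
          simp [List.isEmpty_map, List.isEmpty_reverse]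
          simpa using he
        have hstep : pvStep ((acc.reverse).map pvT, gcur.reverse.map pvOppLetter) c
            = (((gcur.reverse :: acc).reverse).map pvT, ([] : List Char).reverse.map pvOppLetter) := by
          have hg : gcur ≠ [] := by simpa [List.isEmpty_iff] using he
          simp [pvStep, hs, hg, pvT, List.map_reverse]
        rw [hstep, ih [] (gcur.reverse :: acc)]
        simp [PySem.Chars.split₀.go, hs, he]
    · have hstep : pvStep ((acc.reverse).map pvT, gcur.reverse.map pvOppLetter) c
          = ((acc.reverse).map pvT, ((c :: gcur).reverse).map pvOppLetter) := by
        rw [pvStep_char c (by simpa using hs)]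
        simp
      rw [hstep, ih (c :: gcur) acc]
      simp [PySem.Chars.split₀.go, hs]

theorem pvWords_eq (s : String) :
    pvFinish (s.toList.foldl pvStep ([], []))
      = (PySem.Str.split₀ s).map (fun w => String.ofList (w.toList.map pvOppLetter)) := by
  have := pvFold_go s.toList [] []
  simp only [List.reverse_nil, List.map_nil] at this
  rw [this]
  simp [PySem.Str.split₀, PySem.Chars.split₀, List.map_map, pvT, Function.comp,
    String.toList_ofList]

-- ===== VERDICT (by name: the statement is the Claim_ definition above) =====
theorem opposite_case_letter_mapping_spec : Claim_equal_opposite_case_letter_mapping := by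
  intro s _ _
  unfold Spec_opposite_case_letter_mapping opposite_case_letter_mapping opposite_case_letter_mapping_alt
  exact congrArg
    (fun ws => PySem.Str.join " "
      (PySem.List.pyGetD ws (-1) "" :: PySem.List.slice ws none (some (-1))))
    (pvWords_eq s).symm
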